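-- pv_equiv track=rewrite | github.com/ahlashkari/AndroidAppLyzer | Dynamic Features Extraction/android-sandbox/analysis-server/parsers/Func_General.py | Id_count
-- ===== SOURCE A (Python) =====
-- def Id_count(st):
--     Id = []
--     space_start_flg = False
--     for i in range(len(st)):
--         if space_start_flg == False:
--             if st[i] != " ":
--                 space_start_flg = True
--             else:
--                 continue
--         if (st[i] == "u" or st[i] == "s" or st[i] == "e" or st[i] == "r" or st[i] == "I" or st[i] == "d" or
--                 st[i] == "="):
--             continue
--         if st[i] != " ":
--             Id.append(st[i])
--
--         else:
--             return Id
-- ===== SOURCE B (Python) =====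
-- def Id_count(st):
--     s = st.lstrip(" ")
--     i = s.find(" ")
--     if i == -1:
--         return None
--     return [c for c in s[:i] if c not in "userId="]
-- ===== Notes on version B (the rewrite author's own statement) =====
-- stated objective: simpler
-- what changed: Replaced A's single flag-driven character loop (skip-leading-spaces flag, per-char branch chain, early return) with a three-step strip/find/filter pipeline: lstrip the leading spaces, find the first terminating space, then filter the marker characters out of that prefix.
import Mathlib
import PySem

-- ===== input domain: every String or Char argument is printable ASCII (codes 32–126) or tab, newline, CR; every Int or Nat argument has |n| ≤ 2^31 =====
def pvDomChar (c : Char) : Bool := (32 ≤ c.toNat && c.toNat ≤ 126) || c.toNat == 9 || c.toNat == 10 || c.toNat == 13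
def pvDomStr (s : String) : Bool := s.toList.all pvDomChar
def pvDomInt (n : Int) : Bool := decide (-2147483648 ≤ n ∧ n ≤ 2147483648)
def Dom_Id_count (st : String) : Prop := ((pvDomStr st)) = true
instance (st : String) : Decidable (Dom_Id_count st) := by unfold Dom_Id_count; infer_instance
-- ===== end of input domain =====

-- B replaces A's flag-driven per-character loop by an lstrip/find/filter pipeline (simpler decomposition, same O(n) cost).

-- ===== PORT A =====
-- A's single for-loop with the space_start_flg flag and the Id accumulator.
def Id_count_loopA : List Char → Bool → List String → Option (List String)
  | [], _, _ => none
  | c :: rest, flg, acc =>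
    if flg = false ∧ c = ' ' then Id_count_loopA rest false acc          -- 'continue' while flag unset
    else if c = 'u' ∨ c = 's' ∨ c = 'e' ∨ c = 'r' ∨ c = 'I' ∨ c = 'd' ∨ c = '=' then
      Id_count_loopA rest true acc                                       -- 'continue'
    else if c ≠ ' ' then Id_count_loopA rest true (acc ++ [String.ofList [c]])
    else some acc                                                        -- 'return Id'

def Id_count (st : String) : Option (List String) :=
  Id_count_loopA st.toList false []

-- ===== PORT B =====
def Id_count_alt (st : String) : Option (List String) :=
  -- st.lstrip(" "): drop leading spaces only (hand-ported; exact, since the strip set is the single char ' ')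
  let s : List Char := st.toList.dropWhile (· = ' ')
  let i : Int := PySem.Chars.find s [' ']          -- s.find(" ")
  if i = -1 then none
  else some (((PySem.List.slice s none (some i)).filter          -- s[:i]
      (fun c => !(PySem.Chars.isIn [c] "userId=".toList))).map   -- c not in "userId="
      (fun c => String.ofList [c]))

-- ===== PRECONDITION & SPEC =====
def Spec_Id_count (st : String) (out : Option (List String)) : Prop := out = Id_count_alt st
instance (st : String) (out : Option (List String)) : Decidable (Spec_Id_count st out) := by unfold Spec_Id_count; infer_instance

-- ===== CLAIM (what is proved, stated in full; the proofs are below) =====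
def Claim_equal_Id_count : Prop := ∀ (st : String), Dom_Id_count st → Spec_Id_count st (Id_count st)

-- ===== LEMMAS AND PROOFS =====

-- find.go for the single-char pattern [' ']: the index of the first space, offset by k, or -1.
theorem findgo_space (l : List Char) (k : Nat) :
    PySem.Chars.find.go [' '] l k =
      (if ' ' ∈ l then ((k + (l.takeWhile (· ≠ ' ')).length : Nat) : Int) else -1) := by
  induction l generalizing k with
  | nil => simp [PySem.Chars.find.go]
  | cons c t ih =>
    by_cases hc : c = ' '
    · subst hc
      simp [PySem.Chars.find.go, List.isPrefixOf, List.takeWhile]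
    · have hpre : List.isPrefixOf [' '] (c :: t) = false := by
        simp [List.isPrefixOf]; intro h; exact absurd h.symm hc
      have hstep : PySem.Chars.find.go [' '] (c :: t) k = PySem.Chars.find.go [' '] t (k + 1) := by
        simp [PySem.Chars.find.go, hpre]
      have hcs : ¬ (' ' = c) := fun h => hc h.symm
      have htw : (c :: t).takeWhile (· ≠ ' ') = c :: t.takeWhile (· ≠ ' ') := by
        simp [List.takeWhile, hc]
      rw [hstep, ih, htw]
      by_cases h : ' ' ∈ t
      · simp only [h, if_true, List.mem_cons, or_true, List.length_cons]
        push_cast; omega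
      · simp [h, hcs]

-- [c] is contained in l iff c is an element of l.
theorem isIn_singleton (c : Char) (l : List Char) :
    PySem.Chars.isIn [c] l = true ↔ c ∈ l := by
  have h := PySem.Chars.find_eq_neg_one_iff l [c]
  constructor
  · intro hin
    have hne : ¬ PySem.Chars.find l [c] = -1 := by
      simpa [PySem.Chars.isIn, bne_iff_ne] using hin
    have hinf : [c] <:+: l := by
      by_contra hcon; exact hne (h.mpr hcon)
    exact hinf.subset (List.mem_singleton_self c)
  · intro hmem
    obtain ⟨l₁, l₂, rfl⟩ := List.append_of_mem hmem
    have hinf : [c] <:+: (l₁ ++ c :: l₂) := ⟨l₁, l₂, by simp⟩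
    have hne : ¬ PySem.Chars.find (l₁ ++ c :: l₂) [c] = -1 := fun hneg => (h.mp hneg) hinf
    simpa [PySem.Chars.isIn, bne_iff_ne] using hne

-- the membership test '[c] in "userId="' is the disjunction A spells out
theorem isIn_userId (c : Char) :
    PySem.Chars.isIn [c] "userId=".toList =
      decide (c = 'u' ∨ c = 's' ∨ c = 'e' ∨ c = 'r' ∨ c = 'I' ∨ c = 'd' ∨ c = '=') := by
  by_cases h : c = 'u' ∨ c = 's' ∨ c = 'e' ∨ c = 'r' ∨ c = 'I' ∨ c = 'd' ∨ c = '='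
  · simp only [h, decide_true]
    exact (isIn_singleton c _).mpr (by rcases h with h|h|h|h|h|h|h <;> subst h <;> decide)
  · simp only [h, decide_false]
    by_contra hc
    have hmem := (isIn_singleton c _).mp (by simpa using hc)
    have : c = 'u' ∨ c = 's' ∨ c = 'e' ∨ c = 'r' ∨ c = 'I' ∨ c = 'd' ∨ c = '=' := by
      simpa using hmem
    exact h this

-- The flag-true phase of A's loop is B's find/filter on the remaining characters.
theorem loopA_true (m : List Char) (acc : List String) :
    Id_count_loopA m true acc =
      (if ' ' ∈ m then
        some (acc ++ ((m.takeWhile (· ≠ ' ')).filter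
          (fun c => !(PySem.Chars.isIn [c] "userId=".toList))).map (fun c => String.ofList [c]))
       else none) := by
  induction m generalizing acc with
  | nil => simp [Id_count_loopA]
  | cons c t ih =>
    by_cases hsp : c = ' '
    · subst hsp
      simp [Id_count_loopA, List.takeWhile]
    · have hcs : ¬ (' ' = c) := fun h => hsp h.symm
      have htw : (c :: t).takeWhile (· ≠ ' ') = c :: t.takeWhile (· ≠ ' ') := by
        simp [List.takeWhile, hsp]
      by_cases hf : c = 'u' ∨ c = 's' ∨ c = 'e' ∨ c = 'r' ∨ c = 'I' ∨ c = 'd' ∨ c = '='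
      · have hfil : (!(PySem.Chars.isIn [c] "userId=".toList)) = false := by
          rw [isIn_userId]; simp [hf]
        have hA : Id_count_loopA (c :: t) true acc = Id_count_loopA t true acc := by
          simp [Id_count_loopA, hsp, hf]
        rw [hA, ih, htw, List.filter_cons_of_neg (by simpa using hfil)]
        simp [hcs]
      · have hfil : (!(PySem.Chars.isIn [c] "userId=".toList)) = true := by
          rw [isIn_userId]; simp [hf]
        have hA : Id_count_loopA (c :: t) true acc
            = Id_count_loopA t true (acc ++ [String.ofList [c]]) := by
          simp [Id_count_loopA, hsp, hf]
        rw [hA, ih, htw, List.filter_cons_of_pos (by simpa using hfil)]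
        by_cases h : ' ' ∈ t
        · simp [h, hcs]
        · simp [h, hcs]

-- The flag-false phase just drops leading spaces.
theorem loopA_false (l : List Char) (acc : List String) :
    Id_count_loopA l false acc = Id_count_loopA (l.dropWhile (· = ' ')) true acc := by
  induction l with
  | nil => rfl
  | cons c t ih =>
    by_cases hsp : c = ' '
    · subst hsp; simpa [Id_count_loopA, List.dropWhile] using ih
    · simp [Id_count_loopA, List.dropWhile, hsp]

-- ===== VERDICT (by name: the statement is the Claim_ definition above) =====
theorem Id_count_spec : Claim_equal_Id_count := by
  intro st _
  unfold Spec_Id_count Id_count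
  have halt : Id_count_alt st =
      (let s : List Char := st.toList.dropWhile (· = ' ')
       let i : Int := PySem.Chars.find s [' ']
       if i = -1 then none
       else some (((PySem.List.slice s none (some i)).filter
          (fun c => !(PySem.Chars.isIn [c] "userId=".toList))).map (fun c => String.ofList [c]))) := rfl
  rw [halt]
  simp only []
  rw [loopA_false, loopA_true]
  set s : List Char := st.toList.dropWhile (· = ' ') with hs
  rw [show PySem.Chars.find s [' '] = PySem.Chars.find.go [' '] s 0 from rfl, findgo_space]
  by_cases hmem : ' ' ∈ s
  · simp only [hmem, if_true, Nat.zero_add]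
    have hne : ((((s.takeWhile (· ≠ ' ')).length : Nat) : Int)) ≠ -1 := by omega
    rw [if_neg hne, PySem.List.slice_to_natCast]
    have hpre : s.takeWhile (· ≠ ' ') <+: s := List.takeWhile_prefix _
    rw [← List.prefix_iff_eq_take.mp hpre]
    simp
  · simp [hmem]
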